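-- pv_equiv track=rewrite | github.com/bennylow513-bit/lmao | app.py | parse_trial_booking_summary
-- ===== SOURCE A (Python) =====
-- from typing import Dict, List
--
-- def parse_trial_booking_summary(reply: str) -> Dict[str, str]:
--     booking = {
--         "outlet": "",
--         "name": "",
--         "fitness_goal": "",
--     }
--
--     if "Trial Booking Summary:" not in reply:
--         return booking
--
--     for line in reply.splitlines():
--         clean = line.strip()
--
--         if clean.lower().startswith("- outlet:"):
--             booking["outlet"] = clean.split(":", 1)[1].strip()
--
--         elif clean.lower().startswith("- name:"):
--             booking["name"] = clean.split(":", 1)[1].strip()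
--
--         elif clean.lower().startswith("- fitness goal:"):
--             booking["fitness_goal"] = clean.split(":", 1)[1].strip()
--
--     return booking
-- ===== SOURCE B (Python) =====
-- def _last_value(cleans, prefix):
--     # cleans is in reverse document order, so the first match is the last line
--     for clean in cleans:
--         if clean.lower().startswith(prefix):
--             return clean.split(":", 1)[1].strip()
--     return ""
--
--
-- def parse_trial_booking_summary(reply: str):
--     if "Trial Booking Summary:" not in reply:
--         return {"outlet": "", "name": "", "fitness_goal": ""}
--     cleans = [line.strip() for line in reversed(reply.splitlines())]
--     return {
--         "outlet": _last_value(cleans, "- outlet:"),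
--         "name": _last_value(cleans, "- name:"),
--         "fitness_goal": _last_value(cleans, "- fitness goal:"),
--     }
-- ===== Notes on version B (the rewrite author's own statement) =====
-- stated objective: alternative
-- what changed: Replaces A's single forward pass that mutates a three-key dict via an if/elif chain with three independent searches over the reversed stripped lines, each returning the first (i.e. last-in-document) matching line's value.
import Mathlib
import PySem

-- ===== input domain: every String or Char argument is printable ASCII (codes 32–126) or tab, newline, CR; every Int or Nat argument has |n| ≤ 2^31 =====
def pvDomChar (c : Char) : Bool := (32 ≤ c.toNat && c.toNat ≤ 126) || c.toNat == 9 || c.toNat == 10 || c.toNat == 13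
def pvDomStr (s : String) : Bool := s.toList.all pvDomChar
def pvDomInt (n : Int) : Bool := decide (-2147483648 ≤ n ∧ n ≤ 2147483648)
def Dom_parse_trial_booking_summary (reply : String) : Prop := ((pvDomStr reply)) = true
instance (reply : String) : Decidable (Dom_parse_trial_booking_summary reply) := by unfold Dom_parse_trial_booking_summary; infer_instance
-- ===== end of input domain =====

-- B replaces A's forward dict-mutating if/elif scan with three independent
-- last-match searches over the reversed stripped lines (alternative decomposition, same cost).


-- ===== PORT A =====
-- clean.split(":", 1)[1].strip() : the [1] always exists when the guard fired (":" present)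
def pvValA (clean : String) : String :=
  PySem.Str.strip (PySem.List.pyGetD ((PySem.Str.splitMax? clean ":" 1).getD []) 1 "")

def pvStepA (d : PySem.Dict String String) (line : String) : PySem.Dict String String :=
  let clean := PySem.Str.strip line
  if PySem.Str.startswith (PySem.Str.lower clean) "- outlet:" then
    d.insert "outlet" (pvValA clean)
  else if PySem.Str.startswith (PySem.Str.lower clean) "- name:" then
    d.insert "name" (pvValA clean)
  else if PySem.Str.startswith (PySem.Str.lower clean) "- fitness goal:" then
    d.insert "fitness_goal" (pvValA clean)
  else d

def parse_trial_booking_summary (reply : String) : List (String × String) :=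
  let booking : PySem.Dict String String :=
    PySem.Dict.ofList [("outlet", ""), ("name", ""), ("fitness_goal", "")]
  if !(PySem.Str.isIn "Trial Booking Summary:" reply) then booking.items
  else ((PySem.Str.splitlines reply).foldl pvStepA booking).items

-- ===== PORT B =====
def pvValB (clean : String) : String :=
  PySem.Str.strip (PySem.List.pyGetD ((PySem.Str.splitMax? clean ":" 1).getD []) 1 "")

def pvLastValue (cleans : List String) (pfx : String) : String :=
  match cleans.find? (fun c => PySem.Str.startswith (PySem.Str.lower c) pfx) with
  | some c => pvValB c
  | none => ""

def parse_trial_booking_summary_alt (reply : String) : List (String × String) :=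
  if !(PySem.Str.isIn "Trial Booking Summary:" reply) then
    [("outlet", ""), ("name", ""), ("fitness_goal", "")]
  else
    let cleans := ((PySem.Str.splitlines reply).reverse).map PySem.Str.strip
    [("outlet", pvLastValue cleans "- outlet:"),
     ("name", pvLastValue cleans "- name:"),
     ("fitness_goal", pvLastValue cleans "- fitness goal:")]

-- ===== PRECONDITION & SPEC =====
def Spec_parse_trial_booking_summary (reply : String) (out : List (String × String)) : Prop := out = parse_trial_booking_summary_alt reply
instance (reply : String) (out : List (String × String)) : Decidable (Spec_parse_trial_booking_summary reply out) := by unfold Spec_parse_trial_booking_summary; infer_instance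

-- ===== CLAIM (what is proved, stated in full; the proofs are below) =====
def Claim_equal_parse_trial_booking_summary : Prop := ∀ (reply : String), Dom_parse_trial_booking_summary reply → Spec_parse_trial_booking_summary reply (parse_trial_booking_summary reply)

-- ===== LEMMAS AND PROOFS =====

-- two prefixes that differ at some position cannot both be prefixes of the same list
theorem pv_prefix_excl {l p q : List Char} {i : Nat} (hi : i < p.length) (hj : i < q.length)
    (hne : p[i] ≠ q[i]) (hp : p <+: l) : ¬ q <+: l := by
  intro hq
  obtain ⟨tp, hpl⟩ := hp
  obtain ⟨tq, hql⟩ := hq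
  apply hne
  have h1 : l[i]? = some p[i] := by
    rw [← hpl, List.getElem?_append_left (by omega), List.getElem?_eq_getElem hi]
  have h2 : l[i]? = some q[i] := by
    rw [← hql, List.getElem?_append_left (by omega), List.getElem?_eq_getElem hj]
  rw [h1] at h2
  exact Option.some.inj h2

def pvPO (c : String) : Bool := PySem.Str.startswith (PySem.Str.lower c) "- outlet:"
def pvPN (c : String) : Bool := PySem.Str.startswith (PySem.Str.lower c) "- name:"
def pvPG (c : String) : Bool := PySem.Str.startswith (PySem.Str.lower c) "- fitness goal:"

theorem pv_excl_NO {c : String} (h : pvPN c = true) : pvPO c = false := by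
  unfold pvPN at h; unfold pvPO
  rw [PySem.Str.startswith_eq, PySem.Chars.startswith_iff] at h
  rw [PySem.Str.startswith_eq, Bool.eq_false_iff]
  intro ht
  rw [PySem.Chars.startswith_iff] at ht
  exact pv_prefix_excl (p := "- name:".toList) (q := "- outlet:".toList) (i := 2)
    (by decide) (by decide) (by decide) h ht

theorem pv_excl_GO {c : String} (h : pvPG c = true) : pvPO c = false := by
  unfold pvPG at h; unfold pvPO
  rw [PySem.Str.startswith_eq, PySem.Chars.startswith_iff] at h
  rw [PySem.Str.startswith_eq, Bool.eq_false_iff]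
  intro ht
  rw [PySem.Chars.startswith_iff] at ht
  exact pv_prefix_excl (p := "- fitness goal:".toList) (q := "- outlet:".toList) (i := 2)
    (by decide) (by decide) (by decide) h ht

theorem pv_excl_GN {c : String} (h : pvPG c = true) : pvPN c = false := by
  unfold pvPG at h; unfold pvPN
  rw [PySem.Str.startswith_eq, PySem.Chars.startswith_iff] at h
  rw [PySem.Str.startswith_eq, Bool.eq_false_iff]
  intro ht
  rw [PySem.Chars.startswith_iff] at ht
  exact pv_prefix_excl (p := "- fitness goal:".toList) (q := "- name:".toList) (i := 2)
    (by decide) (by decide) (by decide) h ht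

theorem pv_excl_ON {c : String} (h : pvPO c = true) : pvPN c = false := by
  by_cases hn : pvPN c = true
  · rw [pv_excl_NO hn] at h; exact absurd h (by simp)
  · simpa using hn

theorem pv_excl_OG {c : String} (h : pvPO c = true) : pvPG c = false := by
  by_cases hg : pvPG c = true
  · rw [pv_excl_GO hg] at h; exact absurd h (by simp)
  · simpa using hg

theorem pv_excl_NG {c : String} (h : pvPN c = true) : pvPG c = false := by
  by_cases hg : pvPG c = true
  · rw [pv_excl_GN hg] at h; exact absurd h (by simp)
  · simpa using hg

-- per-field last-write step
def pvFO (acc : String) (l : String) : String :=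
  if pvPO (PySem.Str.strip l) then pvValA (PySem.Str.strip l) else acc
def pvFN (acc : String) (l : String) : String :=
  if pvPN (PySem.Str.strip l) then pvValA (PySem.Str.strip l) else acc
def pvFG (acc : String) (l : String) : String :=
  if pvPG (PySem.Str.strip l) then pvValA (PySem.Str.strip l) else acc

-- A's dict fold keeps the shape [("outlet",·),("name",·),("fitness_goal",·)], each field folded independently
theorem pv_inv (ls : List String) : ∀ (o n g : String),
    (ls.foldl pvStepA (PySem.Dict.mk [("outlet", o), ("name", n), ("fitness_goal", g)])).items
    = [("outlet", ls.foldl pvFO o), ("name", ls.foldl pvFN n), ("fitness_goal", ls.foldl pvFG g)] := by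
  induction ls with
  | nil => intro o n g; rfl
  | cons x t ih =>
    intro o n g
    simp only [List.foldl_cons]
    have hstep : pvStepA (PySem.Dict.mk [("outlet", o), ("name", n), ("fitness_goal", g)]) x
        = PySem.Dict.mk [("outlet", pvFO o x), ("name", pvFN n x), ("fitness_goal", pvFG g x)] := by
      unfold pvStepA pvFO pvFN pvFG pvPO pvPN pvPG
      by_cases hO : PySem.Str.startswith (PySem.Str.lower (PySem.Str.strip x)) "- outlet:" = true
      · have hN : PySem.Str.startswith (PySem.Str.lower (PySem.Str.strip x)) "- name:" = false := by
          have := pv_excl_ON (c := PySem.Str.strip x) (by simpa [pvPO] using hO)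
          simpa [pvPN] using this
        have hG : PySem.Str.startswith (PySem.Str.lower (PySem.Str.strip x)) "- fitness goal:" = false := by
          have := pv_excl_OG (c := PySem.Str.strip x) (by simpa [pvPO] using hO)
          simpa [pvPG] using this
        simp at hO hN hG
        simp [hO, hN, hG, PySem.Dict.insert]
      · by_cases hN : PySem.Str.startswith (PySem.Str.lower (PySem.Str.strip x)) "- name:" = true
        · have hG : PySem.Str.startswith (PySem.Str.lower (PySem.Str.strip x)) "- fitness goal:" = false := by
            have := pv_excl_NG (c := PySem.Str.strip x) (by simpa [pvPN] using hN)
            simpa [pvPG] using this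
          simp at hO hN hG
          simp [hO, hN, hG, PySem.Dict.insert]
        · by_cases hG : PySem.Str.startswith (PySem.Str.lower (PySem.Str.strip x)) "- fitness goal:" = true
          · simp at hO hN hG
            simp [hO, hN, hG, PySem.Dict.insert]
          · simp at hO hN hG
            simp [hO, hN, hG]
    rw [hstep, ih]

-- a last-write-wins fold equals the first match of the reversed list
theorem pv_lastmatch (p : String → Bool) (v : String → String) (ls : List String) :
    ∀ (dflt : String),
      ls.foldl (fun acc c => if p c then v c else acc) dflt
      = (match ls.reverse.find? p with | some c => v c | none => dflt) := by
  induction ls with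
  | nil => intro dflt; rfl
  | cons x t ih =>
    intro dflt
    simp only [List.foldl_cons, List.reverse_cons, List.find?_append]
    rw [ih]
    cases h : t.reverse.find? p with
    | some c => simp
    | none =>
      simp only [Option.none_or]
      by_cases hx : p x = true <;> simp [List.find?, hx]

-- each field of A's fold is B's reverse search over the stripped reversed lines
theorem pv_field (ls : List String) (pfx : String) :
    ls.foldl (fun acc l => if PySem.Str.startswith (PySem.Str.lower (PySem.Str.strip l)) pfx
        then pvValA (PySem.Str.strip l) else acc) ""
    = pvLastValue (ls.reverse.map PySem.Str.strip) pfx := by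
  rw [pv_lastmatch (fun l => PySem.Str.startswith (PySem.Str.lower (PySem.Str.strip l)) pfx)
      (fun l => pvValA (PySem.Str.strip l)) ls ""]
  unfold pvLastValue
  rw [List.find?_map]
  have hcomp : ((fun c => PySem.Str.startswith (PySem.Str.lower c) pfx) ∘ PySem.Str.strip)
      = (fun l => PySem.Str.startswith (PySem.Str.lower (PySem.Str.strip l)) pfx) := rfl
  rw [hcomp]
  cases h : ls.reverse.find? (fun l => PySem.Str.startswith (PySem.Str.lower (PySem.Str.strip l)) pfx) with
  | some c => rfl
  | none => rfl

-- ===== VERDICT (by name: the statement is the Claim_ definition above) =====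
theorem parse_trial_booking_summary_spec : Claim_equal_parse_trial_booking_summary := by
  intro reply _
  unfold Spec_parse_trial_booking_summary
  unfold parse_trial_booking_summary parse_trial_booking_summary_alt
  by_cases h : PySem.Str.isIn "Trial Booking Summary:" reply = true
  · simp only [h, Bool.not_true, Bool.false_eq_true, if_false]
    have hb : PySem.Dict.ofList [("outlet", ""), ("name", ""), ("fitness_goal", "")]
        = PySem.Dict.mk [("outlet", ""), ("name", ""), ("fitness_goal", "")] := by decide
    rw [hb, pv_inv]
    rw [show pvFO = fun acc l => if PySem.Str.startswith (PySem.Str.lower (PySem.Str.strip l))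
          "- outlet:" then pvValA (PySem.Str.strip l) else acc from rfl,
        show pvFN = fun acc l => if PySem.Str.startswith (PySem.Str.lower (PySem.Str.strip l))
          "- name:" then pvValA (PySem.Str.strip l) else acc from rfl,
        show pvFG = fun acc l => if PySem.Str.startswith (PySem.Str.lower (PySem.Str.strip l))
          "- fitness goal:" then pvValA (PySem.Str.strip l) else acc from rfl,
        pv_field, pv_field, pv_field]
  · simp only [h, Bool.not_false, if_true]
    decide
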